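-- pv_equiv track=rewrite | github.com/Bobbys456/FT370-project1 | project1.py | most_similar_sentence
-- ===== SOURCE A (Python) =====
-- def most_similar_sentence(target_sentence, sentences_list):
--     """Return the most similar sentence from sentences_list to the target_sentence."""
--     max_shared_words = 0
--     most_similar = None
--     for sentence in sentences_list:
--         shared_words = sum(1 for word in target_sentence.split() if word in sentence.split())
--         if shared_words > max_shared_words:
--             max_shared_words = shared_words
--             most_similar = sentence
--     return most_similar
-- ===== SOURCE B (Python) =====
-- def most_similar_sentence(target_sentence, sentences_list):
--     """Return the most similar sentence from sentences_list to the target_sentence."""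
--     # Inverted index: word -> indices of sentences containing it.
--     index = {}
--     for i, sentence in enumerate(sentences_list):
--         for w in set(sentence.split()):
--             index.setdefault(w, []).append(i)
--     # Scatter: each target word occurrence adds 1 to every sentence that has it.
--     scores = [0] * len(sentences_list)
--     for w in target_sentence.split():
--         for i in index.get(w, []):
--             scores[i] += 1
--     # First sentence with a strictly maximal positive score.
--     best = None
--     best_score = 0
--     for sentence, score in zip(sentences_list, scores):
--         if score > best_score:
--             best_score = score
--             best = sentence
--     return best
-- ===== Notes on version B (the rewrite author's own statement) =====
-- stated objective: faster
-- what changed: B builds an inverted index from words to sentence indices, scatters each target word occurrence into a per-sentence score array, then scans sentences zipped with their scores for the first strict maximum, instead of rescanning the target against each sentence with a list-membership test.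
import Mathlib
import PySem

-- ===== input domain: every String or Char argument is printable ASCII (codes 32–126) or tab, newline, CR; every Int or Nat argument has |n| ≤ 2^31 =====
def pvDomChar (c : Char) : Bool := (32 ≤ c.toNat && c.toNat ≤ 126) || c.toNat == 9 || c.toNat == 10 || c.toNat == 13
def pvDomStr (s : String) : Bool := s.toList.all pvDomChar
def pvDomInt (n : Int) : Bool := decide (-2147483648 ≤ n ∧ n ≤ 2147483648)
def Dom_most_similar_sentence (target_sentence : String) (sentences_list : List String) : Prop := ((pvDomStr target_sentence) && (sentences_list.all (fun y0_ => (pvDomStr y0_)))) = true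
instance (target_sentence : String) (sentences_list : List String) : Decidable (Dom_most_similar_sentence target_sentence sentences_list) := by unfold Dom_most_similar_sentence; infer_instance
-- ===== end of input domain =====

-- B replaces A's per-sentence rescan of the target by an inverted index (word → sentence
-- indices) scattered into a per-sentence score array, then a scan for the first strict
-- maximum (objective: faster).

-- ===== PORT A =====
def most_similar_sentence (target_sentence : String) (sentences_list : List String) : Option String :=
  let r := sentences_list.foldl (fun (st : Int × Option String) sentence =>
    let shared_words : Int := (PySem.Str.split₀ target_sentence).foldl
        (fun acc word => if word ∈ PySem.Str.split₀ sentence then acc + 1 else acc) 0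
    if shared_words > st.1 then (shared_words, some sentence) else st) ((0 : Int), (none : Option String))
  r.2

-- ===== PORT B =====
def most_similar_sentence_alt (target_sentence : String) (sentences_list : List String) : Option String :=
  let index : PySem.Dict String (List Int) :=
    (PySem.List.enumerate sentences_list).foldl (fun d p =>
      (PySem.Set.ofList (PySem.Str.split₀ p.2)).foldl
        (fun d w => d.insert w (d.getD w [] ++ [p.1])) d) PySem.Dict.empty
  let scores : List Int :=
    (PySem.Str.split₀ target_sentence).foldl (fun sc w =>
      (index.getD w []).foldl (fun sc i =>
        PySem.List.pySetD sc i (PySem.List.pyGetD sc i 0 + 1)) sc)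
      (List.replicate sentences_list.length 0)
  let r := (sentences_list.zip scores).foldl (fun (st : Int × Option String) p =>
    if p.2 > st.1 then (p.2, some p.1) else st) ((0 : Int), (none : Option String))
  r.2

-- ===== PRECONDITION & SPEC =====
def Spec_most_similar_sentence (target_sentence : String) (sentences_list : List String) (out : Option String) : Prop := out = most_similar_sentence_alt target_sentence sentences_list
instance (target_sentence : String) (sentences_list : List String) (out : Option String) : Decidable (Spec_most_similar_sentence target_sentence sentences_list out) := by unfold Spec_most_similar_sentence; infer_instance

-- ===== CLAIM (what is proved, stated in full; the proofs are below) =====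
def Claim_equal_most_similar_sentence : Prop := ∀ (target_sentence : String) (sentences_list : List String), Dom_most_similar_sentence target_sentence sentences_list → Spec_most_similar_sentence target_sentence sentences_list (most_similar_sentence target_sentence sentences_list)

-- ===== LEMMAS AND PROOFS =====

lemma getD_fold_not_mem (S : List String) (d : PySem.Dict String (List Int)) (i : Int) (w : String)
    (hw : w ∉ S) :
    (S.foldl (fun d u => d.insert u (d.getD u [] ++ [i])) d).getD w [] = d.getD w [] := by
  induction S generalizing d with
  | nil => rfl
  | cons u S ih =>
    have hne : w ≠ u := fun h => hw (h ▸ List.mem_cons_self)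
    rw [List.foldl_cons, ih _ (fun h => hw (List.mem_cons_of_mem _ h)),
        PySem.Dict.getD_insert, if_neg hne]

lemma index_inner (S : List String) (hS : S.Nodup) (d : PySem.Dict String (List Int)) (i : Int) (w : String) :
    (S.foldl (fun d u => d.insert u (d.getD u [] ++ [i])) d).getD w []
      = d.getD w [] ++ (if w ∈ S then [i] else []) := by
  induction S generalizing d with
  | nil => simp
  | cons u S ih =>
    rcases List.nodup_cons.mp hS with ⟨hu, hS'⟩
    rw [List.foldl_cons]
    by_cases hwu : w = u
    · subst hwu
      rw [getD_fold_not_mem S _ i w hu, PySem.Dict.getD_insert_self]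
      simp
    · rw [ih hS', PySem.Dict.getD_insert, if_neg hwu]
      simp [hwu]

lemma index_getD (ps : List (Int × String)) (d : PySem.Dict String (List Int)) (w : String) :
    (ps.foldl (fun d p =>
      (PySem.Set.ofList (PySem.Str.split₀ p.2)).foldl
        (fun d u => d.insert u (d.getD u [] ++ [p.1])) d) d).getD w []
      = d.getD w [] ++ (ps.filter (fun p => decide (w ∈ PySem.Str.split₀ p.2))).map (·.1) := by
  induction ps generalizing d with
  | nil => simp
  | cons p ps ih =>
    rw [List.foldl_cons, ih, index_inner _ (PySem.Set.nodup_ofList _)]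
    by_cases hm : w ∈ PySem.Str.split₀ p.2
    · simp [hm, PySem.Set.mem_ofList]
    · simp [hm, PySem.Set.mem_ofList]

lemma scatter_inner (E : List Int) (sc : List Int) (j : Nat) (hj : j < sc.length)
    (hE : ∀ i ∈ E, ∃ k : Nat, i = (k : Int) ∧ k < sc.length) :
    PySem.List.pyGetD (E.foldl (fun sc i =>
        PySem.List.pySetD sc i (PySem.List.pyGetD sc i 0 + 1)) sc) (j : Int) 0
      = PySem.List.pyGetD sc (j : Int) 0 + (E.count (j : Int) : Int) := by
  induction E generalizing sc with
  | nil => simp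
  | cons i E ih =>
    obtain ⟨k, rfl, hk⟩ := hE i List.mem_cons_self
    rw [List.foldl_cons]
    have hlen : (PySem.List.pySetD sc (k : Int) (PySem.List.pyGetD sc (k : Int) 0 + 1)).length = sc.length := by
      simp [PySem.List.pySetD_natCast]
    rw [ih _ (by rw [hlen]; exact hj) (fun i hi => by rw [hlen]; exact hE i (List.mem_cons_of_mem _ hi)),
        PySem.List.pyGetD_pySetD_natCast sc k j _ 0 hk, List.count_cons]
    by_cases hjk : j = k
    · simp [hjk]; ring
    · simp [hjk]; omega

lemma scatter_length (t : List String) (I : String → List Int) (sc : List Int) :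
    (t.foldl (fun sc w => (I w).foldl (fun sc i =>
        PySem.List.pySetD sc i (PySem.List.pyGetD sc i 0 + 1)) sc) sc).length = sc.length := by
  induction t generalizing sc with
  | nil => rfl
  | cons w t ih =>
    rw [List.foldl_cons, ih]
    generalize I w = E
    induction E generalizing sc with
    | nil => rfl
    | cons i E ihE => rw [List.foldl_cons, ihE, PySem.List.length_pySetD]

lemma count_fst_filter (ps : List (Int × String)) (hnd : ps.Pairwise (fun p q => p.1 < q.1))
    (pr : Int × String → Bool) (j : Int) (s : String) (hmem : (j, s) ∈ ps) :
    ((ps.filter pr).map (·.1)).count j = if pr (j, s) then 1 else 0 := by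
  induction ps with
  | nil => simp at hmem
  | cons p ps ih =>
    rcases List.pairwise_cons.mp hnd with ⟨hp, hps⟩
    rcases List.mem_cons.mp hmem with h | h
    · subst h
      have hnot : ∀ q ∈ ps.filter pr, q.1 ≠ j := by
        intro q hq
        exact fun he => absurd (he ▸ hp q (List.mem_of_mem_filter hq)) (lt_irrefl j)
      have hzero : ((ps.filter pr).map (·.1)).count j = 0 := by
        rw [List.count_eq_zero]
        intro hmemj
        obtain ⟨q, hq, hq1⟩ := List.mem_map.mp hmemj
        exact hnot q hq hq1
      by_cases hpr : pr (j, s)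
      · rw [List.filter_cons_of_pos hpr, List.map_cons, List.count_cons_self, hzero, if_pos hpr]
      · rw [List.filter_cons_of_neg (by simpa using hpr), hzero, if_neg hpr]
    · have hne : p.1 ≠ j := fun he => absurd (he ▸ hp (j, s) h) (lt_irrefl j)
      by_cases hpr : pr p
      · rw [List.filter_cons_of_pos hpr, List.map_cons, List.count_cons, ih hps h]
        simp [hne]
      · rw [List.filter_cons_of_neg (by simpa using hpr), ih hps h]

lemma scatter_outer (t : List String) (Ew : String → List Int) (sc : List Int) (j : Nat)
    (hj : j < sc.length)
    (hE : ∀ w, ∀ i ∈ Ew w, ∃ k : Nat, i = (k : Int) ∧ k < sc.length) :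
    PySem.List.pyGetD (t.foldl (fun sc w => (Ew w).foldl (fun sc i =>
        PySem.List.pySetD sc i (PySem.List.pyGetD sc i 0 + 1)) sc) sc) (j : Int) 0
      = PySem.List.pyGetD sc (j : Int) 0
        + (t.map (fun w => ((Ew w).count (j : Int) : Int))).sum := by
  induction t generalizing sc with
  | nil => simp
  | cons w t ih =>
    rw [List.foldl_cons]
    have hlen : ((Ew w).foldl (fun sc i =>
        PySem.List.pySetD sc i (PySem.List.pyGetD sc i 0 + 1)) sc).length = sc.length :=
      scatter_length [w] Ew sc
    rw [ih _ (by rw [hlen]; exact hj) (fun w' i hi => by rw [hlen]; exact hE w' i hi),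
        scatter_inner _ _ _ hj (hE w)]
    simp; ring

lemma scores_getD (target : String) (sentences : List String) (j : Nat) (hj : j < sentences.length) :
    PySem.List.pyGetD
      ((PySem.Str.split₀ target).foldl (fun sc w =>
        (((PySem.List.enumerate sentences).foldl (fun d p =>
          (PySem.Set.ofList (PySem.Str.split₀ p.2)).foldl
            (fun d u => d.insert u (d.getD u [] ++ [p.1])) d) PySem.Dict.empty).getD w []).foldl
          (fun sc i => PySem.List.pySetD sc i (PySem.List.pyGetD sc i 0 + 1)) sc)
        (List.replicate sentences.length 0)) (j : Int) 0
      = ((PySem.Str.split₀ target).countP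
          (fun w => decide (w ∈ PySem.Str.split₀ sentences[j])) : Int) := by
  have hIw : ∀ w, (((PySem.List.enumerate sentences).foldl (fun d p =>
      (PySem.Set.ofList (PySem.Str.split₀ p.2)).foldl
        (fun d u => d.insert u (d.getD u [] ++ [p.1])) d) PySem.Dict.empty).getD w [])
      = ((PySem.List.enumerate sentences).filter
          (fun p => decide (w ∈ PySem.Str.split₀ p.2))).map (·.1) := by
    intro w
    rw [index_getD]
    simp
  have hmemj : ((j : Int), sentences[j]) ∈ PySem.List.enumerate sentences := by
    rw [show PySem.List.enumerate sentences = PySem.List.enumerate sentences 0 from rfl,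
        PySem.List.mem_enumerate_iff]
    exact ⟨j, hj, by simp⟩
  have hcount : ∀ w, ((((PySem.List.enumerate sentences).filter
      (fun p => decide (w ∈ PySem.Str.split₀ p.2))).map (·.1)).count (j : Int))
      = if decide (w ∈ PySem.Str.split₀ sentences[j]) then 1 else 0 := by
    intro w
    exact count_fst_filter _ (PySem.List.pairwise_lt_enumerate _ _) _ _ _ hmemj
  have hE : ∀ w, ∀ i ∈ (((PySem.List.enumerate sentences).foldl (fun d p =>
      (PySem.Set.ofList (PySem.Str.split₀ p.2)).foldl
        (fun d u => d.insert u (d.getD u [] ++ [p.1])) d) PySem.Dict.empty).getD w []),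
      ∃ k : Nat, i = (k : Int) ∧ k < (List.replicate sentences.length (0 : Int)).length := by
    intro w i hi
    rw [hIw] at hi
    obtain ⟨p, hp, hp1⟩ := List.mem_map.mp hi
    have := List.mem_of_mem_filter hp
    rw [show PySem.List.enumerate sentences = PySem.List.enumerate sentences 0 from rfl,
        PySem.List.mem_enumerate_iff] at this
    obtain ⟨k, hk, rfl⟩ := this
    exact ⟨k, by simp [← hp1], by simpa using hk⟩
  rw [scatter_outer _ _ _ j (by simpa using hj) hE]
  have hrep : PySem.List.pyGetD (List.replicate sentences.length (0 : Int)) (j : Int) 0 = 0 := by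
    rw [PySem.List.pyGetD_natCast]
    simp [List.getD]
  rw [hrep]
  have key : ∀ w, ((((PySem.List.enumerate sentences).foldl (fun d p =>
      (PySem.Set.ofList (PySem.Str.split₀ p.2)).foldl
        (fun d u => d.insert u (d.getD u [] ++ [p.1])) d) PySem.Dict.empty).getD w []).count (j : Int) : Int)
      = if decide (w ∈ PySem.Str.split₀ sentences[j]) then (1 : Int) else 0 := by
    intro w
    rw [hIw, hcount]
    split <;> rfl
  rw [List.map_congr_left (fun w _ => key w), PySem.List.sum_map_ite_one_zero]
  simp

lemma zip_fold (sentences : List String) (f : String → Int) (st : Int × Option String) :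
    (sentences.zip (sentences.map f)).foldl (fun st p =>
        if p.2 > st.1 then (p.2, some p.1) else st) st
      = sentences.foldl (fun st s => if f s > st.1 then (f s, some s) else st) st := by
  induction sentences generalizing st with
  | nil => rfl
  | cons s sentences ih => simp [ih]

-- ===== VERDICT (by name: the statement is the Claim_ definition above) =====
theorem most_similar_sentence_spec : Claim_equal_most_similar_sentence := by
  intro target_sentence sentences_list _
  unfold Spec_most_similar_sentence most_similar_sentence most_similar_sentence_alt
  simp only []
  have hA : ∀ s : String, (PySem.Str.split₀ target_sentence).foldl
      (fun acc word => if word ∈ PySem.Str.split₀ s then acc + 1 else acc) (0 : Int)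
      = ((PySem.Str.split₀ target_sentence).countP
          (fun w => decide (w ∈ PySem.Str.split₀ s)) : Int) := by
    intro s
    rw [PySem.List.foldl_ite_add_one (p := fun w => w ∈ PySem.Str.split₀ s)]
    simp
  have hscores : ((PySem.Str.split₀ target_sentence).foldl (fun sc w =>
      (((PySem.List.enumerate sentences_list).foldl (fun d p =>
        (PySem.Set.ofList (PySem.Str.split₀ p.2)).foldl
          (fun d u => d.insert u (d.getD u [] ++ [p.1])) d) PySem.Dict.empty).getD w []).foldl
        (fun sc i => PySem.List.pySetD sc i (PySem.List.pyGetD sc i 0 + 1)) sc)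
      (List.replicate sentences_list.length 0))
      = sentences_list.map (fun s => ((PySem.Str.split₀ target_sentence).countP
          (fun w => decide (w ∈ PySem.Str.split₀ s)) : Int)) := by
    apply List.ext_getElem
    · rw [scatter_length]
      simp
    · intro j h1 h2
      have hj : j < sentences_list.length := by
        rw [scatter_length] at h1
        simpa using h1
      have := scores_getD target_sentence sentences_list j hj
      rw [PySem.List.pyGetD_eq_getElem _ _ (by positivity) (by exact_mod_cast h1)] at this
      simpa using this
  rw [hscores, zip_fold]
  congr 1
  apply PySem.List.foldl_congr_mem
  intro st s _
  rw [hA]
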